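-- pv_equiv track=rewrite | github.com/jinukim-ml/coding-test-prep | Programmers/Stack and queue/131704.py | solution
-- ===== SOURCE A (Python) =====
-- from collections import deque
--
-- def solution(order):
--     answer = 0
--     stack = deque()
--
--     for i in range(1, len(order)+1):
--         stack.append(i)
--
--         while stack and stack[-1] == order[answer]:
--             stack.pop()
--             answer += 1
--     return answer
-- ===== SOURCE B (Python) =====
-- def solution(order):
--     n = len(order)
--     answer = 0
--     cur = 1
--     stack = []
--     for target in order:
--         while cur <= n and (not stack or stack[-1] != target):
--             stack.append(cur)
--             cur += 1
--         if stack and stack[-1] == target: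
--             stack.pop()
--             answer += 1
--         else:
--             break
--     return answer
-- ===== Notes on version B (the rewrite author's own statement) =====
-- stated objective: alternative
-- what changed: B is driven by the targets in order (lazily push boxes until the needed one is on top, pop at most once per target, break on first failure) instead of A's loop over indices 1..n with an inner pop-while; the answer counter no longer doubles as the order index.
import Mathlib
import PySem

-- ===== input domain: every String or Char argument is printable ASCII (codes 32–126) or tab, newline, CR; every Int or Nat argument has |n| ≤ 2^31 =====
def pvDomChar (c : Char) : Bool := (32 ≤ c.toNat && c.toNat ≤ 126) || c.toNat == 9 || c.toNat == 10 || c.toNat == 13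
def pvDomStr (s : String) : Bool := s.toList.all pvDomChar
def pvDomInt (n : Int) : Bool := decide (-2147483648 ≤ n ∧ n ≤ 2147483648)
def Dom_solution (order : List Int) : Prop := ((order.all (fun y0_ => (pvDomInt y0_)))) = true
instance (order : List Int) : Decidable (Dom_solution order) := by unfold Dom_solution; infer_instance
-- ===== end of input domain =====

-- B drives the simulation by the targets in `order` (push lazily until the needed box is on top,
-- pop at most once per target, break on failure) instead of A's push-every-index/pop-while loop;
-- objective: alternative decomposition, same asymptotic cost.

-- ===== PORT A =====
-- the `while stack and stack[-1] == order[answer]` loop of A; stack top is the list head.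
-- `order[answer]` is ported as pyGet?; the comparison `pyGet? = some t` is exact whenever the
-- index is in range, and `answer` provably never leaves range while the stack is nonempty.
def popLoopA (order : List Int) : Int → List Int → Int × List Int
  | a, [] => (a, [])
  | a, t :: s =>
    if PySem.List.pyGet? order a = some t then popLoopA order (a + 1) s else (a, t :: s)

def solution (order : List Int) : Int :=
  ((PySem.List.pyRange 1 ((order.length : Int) + 1) 1).foldl
      (fun st i => popLoopA order st.1 (i :: st.2)) ((0 : Int), ([] : List Int))).1

-- ===== PORT B =====
-- `while cur <= n and (not stack or stack[-1] != target): stack.append(cur); cur += 1`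
def pushUntil (n t : Int) : Int → List Int → List Int × Int
  | cur, stack =>
    if h : cur ≤ n ∧ (stack = [] ∨ stack.head? ≠ some t) then
      pushUntil n t (cur + 1) (cur :: stack)
    else
      (stack, cur)
  termination_by cur _ => (n + 1 - cur).toNat
  decreasing_by omega

-- `for target in order: … else break` with state (cur, stack, answer)
def bRec (n : Int) : List Int → Int → List Int → Int → Int
  | [], _, _, ans => ans
  | t :: rest, cur, stack, ans =>
    match pushUntil n t cur stack with
    | (x :: s3, c2) => if x = t then bRec n rest c2 s3 (ans + 1) else ans
    | ([], _) => ans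

def solution_alt (order : List Int) : Int :=
  bRec (order.length : Int) order 1 [] 0

-- ===== PRECONDITION & SPEC =====
def Spec_solution (order : List Int) (out : Int) : Prop := out = solution_alt order
instance (order : List Int) (out : Int) : Decidable (Spec_solution order out) := by unfold Spec_solution; infer_instance

-- ===== CLAIM (what is proved, stated in full; the proofs are below) =====
def Claim_equal_solution : Prop := ∀ (order : List Int), Dom_solution order → Spec_solution order (solution order)

-- ===== LEMMAS AND PROOFS =====

-- Nat-indexed mirror of popLoopA (A's answer is always a nonnegative in-range index)
def popN (order : List Int) : Nat → List Int → Nat × List Int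
  | a, [] => (a, [])
  | a, t :: s => if order[a]? = some t then popN order (a + 1) s else (a, t :: s)

-- "A-stable" state: the stack is empty or its top is not the current target
def StableN (order : List Int) (a : Nat) : List Int → Prop
  | [] => True
  | x :: _ => order[a]? ≠ some x

lemma popLoopA_eq_popN (order : List Int) (s : List Int) : ∀ (a : Nat),
    popLoopA order (a : Int) s = (((popN order a s).1 : Int), (popN order a s).2) := by
  induction s with
  | nil => intro a; simp [popLoopA, popN]
  | cons t s ih =>
    intro a
    simp only [popLoopA, popN, PySem.List.pyGet?_natCast]
    by_cases h : order[a]? = some t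
    · rw [if_pos h, if_pos h]
      have hc : ((a : Int) + 1) = ((a + 1 : Nat) : Int) := by push_cast; ring
      rw [hc, ih]
    · rw [if_neg h, if_neg h]

lemma lt_of_getElem?_eq_some {order : List Int} {a : Nat} {t : Int}
    (h : order[a]? = some t) : a < order.length := by
  obtain ⟨halt, _⟩ := List.getElem?_eq_some_iff.mp h
  exact halt

lemma popN_le (order : List Int) (s : List Int) : ∀ (a : Nat), a ≤ order.length →
    (popN order a s).1 ≤ order.length := by
  induction s with
  | nil => intro a ha; simpa [popN] using ha
  | cons t s ih =>
    intro a ha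
    simp only [popN]
    by_cases h : order[a]? = some t
    · rw [if_pos h]
      exact ih (a + 1) (lt_of_getElem?_eq_some h)
    · rw [if_neg h]; exact ha

lemma popN_stable (order : List Int) (s : List Int) : ∀ (a : Nat),
    StableN order (popN order a s).1 (popN order a s).2 := by
  induction s with
  | nil => intro a; simp [popN, StableN]
  | cons t s ih =>
    intro a
    simp only [popN]
    by_cases h : order[a]? = some t
    · rw [if_pos h]; exact ih (a + 1)
    · rw [if_neg h]; exact h

lemma pushUntil_stop (n t cur : Int) (stack : List Int)
    (h : ¬ (cur ≤ n ∧ (stack = [] ∨ stack.head? ≠ some t))) :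
    pushUntil n t cur stack = (stack, cur) := by
  rw [pushUntil]; simp [h]

lemma pushUntil_step (n t cur : Int) (stack : List Int)
    (h : cur ≤ n ∧ (stack = [] ∨ stack.head? ≠ some t)) :
    pushUntil n t cur stack = pushUntil n t (cur + 1) (cur :: stack) := by
  rw [pushUntil]; simp [h]

lemma drop_cons_of_getElem? {order : List Int} {a : Nat} {t : Int}
    (h : order[a]? = some t) : order.drop a = t :: order.drop (a + 1) := by
  obtain ⟨halt, hget⟩ := List.getElem?_eq_some_iff.mp h
  rw [List.drop_eq_getElem_cons halt, hget]

lemma getElem?_of_drop_cons {order : List Int} {a : Nat} {t : Int} {rest : List Int}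
    (hd : order.drop a = t :: rest) : order[a]? = some t := by
  have h0 : (order.drop a)[0]? = order[a]? := by simp
  rw [hd] at h0
  exact h0.symm

-- B pops eagerly: bRec absorbs a whole popN phase, one target at a time
lemma bRec_popN (order : List Int) (s : List Int) : ∀ (a : Nat) (cur : Int),
    bRec (order.length : Int) (order.drop a) cur s (a : Int)
      = bRec (order.length : Int) (order.drop (popN order a s).1) cur (popN order a s).2
          (((popN order a s).1 : Int)) := by
  induction s with
  | nil => intro a cur; simp [popN]
  | cons x s3 ih =>
    intro a cur
    simp only [popN]
    by_cases h : order[a]? = some x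
    · rw [if_pos h, drop_cons_of_getElem? h]
      have hpu : pushUntil (order.length : Int) x cur (x :: s3) = (x :: s3, cur) := by
        apply pushUntil_stop; simp
      simp only [bRec, hpu, if_true]
      have hc : ((a : Int) + 1) = ((a + 1 : Nat) : Int) := by push_cast; ring
      rw [hc, ih (a + 1) cur]
    · rw [if_neg h]

-- the main simulation lemma: from any A-stable state, A's remaining fold equals B's remaining run
lemma main_sim (order : List Int) : ∀ (m : Nat) (c : Int),
    c + m = (order.length : Int) + 1 →
    ∀ (a : Nat) (s : List Int), a ≤ order.length → StableN order a s →
    ((PySem.List.pyRange c ((order.length : Int) + 1) 1).foldl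
        (fun st i => popLoopA order st.1 (i :: st.2)) ((a : Int), s)).1
      = bRec (order.length : Int) (order.drop a) c s (a : Int) := by
  intro m
  induction m with
  | zero =>
    intro c hc a s ha hst
    rw [PySem.List.pyRange_one_eq_nil (by omega)]
    simp only [List.foldl_nil]
    cases hd : order.drop a with
    | nil => simp [bRec]
    | cons t rest =>
      have ht : order[a]? = some t := getElem?_of_drop_cons hd
      have hpu : pushUntil (order.length : Int) t c s = (s, c) := by
        apply pushUntil_stop; intro hco; omega
      cases s with
      | nil => simp [bRec, hpu]
      | cons x s3 =>
        have hxt : ¬ x = t := fun he => hst (he ▸ ht)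
        simp [bRec, hpu, hxt]
  | succ m ih =>
    intro c hc a s ha hst
    rw [PySem.List.pyRange_one_cons (by omega)]
    simp only [List.foldl_cons]
    by_cases hac : order[a]? = some c
    · -- the pushed index c is the current target: A pops it and keeps popping
      have hstepA : popLoopA order (a : Int) (c :: s)
          = (((popN order (a + 1) s).1 : Int), (popN order (a + 1) s).2) := by
        simp only [popLoopA, PySem.List.pyGet?_natCast]
        rw [if_pos hac]
        have hc1 : ((a : Int) + 1) = ((a + 1 : Nat) : Int) := by push_cast; ring
        rw [hc1, popLoopA_eq_popN]
      rw [hstepA,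
        ih (c + 1) (by omega) (popN order (a + 1) s).1 (popN order (a + 1) s).2
          (popN_le order s (a + 1) (lt_of_getElem?_eq_some hac))
          (popN_stable order s (a + 1))]
      -- B side
      rw [drop_cons_of_getElem? hac]
      have hpu : pushUntil (order.length : Int) c c s = (c :: s, c + 1) := by
        rw [pushUntil_step _ _ _ _ ⟨by omega, by
          cases s with
          | nil => exact Or.inl rfl
          | cons x s3 =>
            right
            simp only [List.head?_cons, ne_eq, Option.some.injEq]
            exact fun he => hst (he ▸ hac)⟩]
        apply pushUntil_stop; simp
      simp only [bRec, hpu, if_true]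
      have hc1 : ((a : Int) + 1) = ((a + 1 : Nat) : Int) := by push_cast; ring
      rw [hc1, bRec_popN order s (a + 1) (c + 1)]
    · -- pushed index is not the target: A's pop loop stops immediately
      have hstepA : popLoopA order (a : Int) (c :: s) = ((a : Int), c :: s) := by
        simp only [popLoopA, PySem.List.pyGet?_natCast]
        rw [if_neg hac]
      rw [hstepA, ih (c + 1) (by omega) a (c :: s) ha hac]
      cases hd : order.drop a with
      | nil => simp [bRec]
      | cons t rest =>
        have ht : order[a]? = some t := getElem?_of_drop_cons hd
        have hpu : pushUntil (order.length : Int) t c s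
            = pushUntil (order.length : Int) t (c + 1) (c :: s) := by
          apply pushUntil_step
          refine ⟨by omega, ?_⟩
          cases s with
          | nil => exact Or.inl rfl
          | cons x s3 =>
            right
            simp only [List.head?_cons, ne_eq, Option.some.injEq]
            exact fun he => hst (he ▸ ht)
        simp only [bRec, hpu]

-- ===== VERDICT (by name: the statement is the Claim_ definition above) =====
theorem solution_spec : Claim_equal_solution := by
  intro order _
  unfold Spec_solution solution solution_alt
  have := main_sim order order.length 1 (by omega) 0 [] (by omega) trivial
  simpa using this
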